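-- pv_equiv track=rewrite | github.com/meiling10927256/portfolio | Page replacement/10927256_page_replacement.py | intoStr
-- ===== SOURCE A (Python) =====
-- def intoStr( pageFrame ) :
-- 	# 複製pageFrame的內容出來，避免做reverse的時候改到原始的內容
-- 	# deep copy
-- 	pf = []
-- 	for i in range(len(pageFrame)) :
-- 		pf.append(pageFrame[i])
-- 	pf.reverse()
--
-- 	temp = ''
-- 	for i in range( len(pf) ) :
-- 		temp = temp + str(pf[i])
--
-- 	return temp
-- ===== SOURCE B (Python) =====
-- def intoStr(pageFrame):
--     # divide and conquer: the reversed concatenation of a list is the reversed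
--     # concatenation of its second half followed by that of its first half;
--     # a singleton is just str of its element. No copy, no reverse, no index loop.
--     n = len(pageFrame)
--     if n == 0:
--         return ''
--
--     def go(lo, hi):  # reversed concatenation of pageFrame[lo:hi], hi > lo
--         if hi - lo == 1:
--             return str(pageFrame[lo])
--         mid = (lo + hi) // 2
--         return go(mid, hi) + go(lo, mid)
--
--     return go(0, n)
-- ===== Notes on version B (the rewrite author's own statement) =====
-- stated objective: alternative
-- what changed: B replaces A's copy loop, in-place reverse and left-to-right concatenation loop with a divide-and-conquer recursion on index halves: the reversed concatenation of a segment is go(mid,hi) + go(lo,mid), with str(pageFrame[lo]) at singletons; no copy and no reverse pass.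
import Mathlib
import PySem

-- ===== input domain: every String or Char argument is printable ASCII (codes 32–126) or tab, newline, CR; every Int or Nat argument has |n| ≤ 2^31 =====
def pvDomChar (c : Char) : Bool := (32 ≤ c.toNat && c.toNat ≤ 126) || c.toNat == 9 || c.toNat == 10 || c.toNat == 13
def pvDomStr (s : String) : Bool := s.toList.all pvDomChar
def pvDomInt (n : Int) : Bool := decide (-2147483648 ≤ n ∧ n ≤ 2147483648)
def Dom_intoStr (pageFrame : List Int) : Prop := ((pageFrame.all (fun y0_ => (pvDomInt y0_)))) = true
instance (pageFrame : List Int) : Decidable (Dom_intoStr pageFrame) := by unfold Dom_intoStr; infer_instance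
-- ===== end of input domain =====

-- B replaces A's copy loop + in-place reverse + concatenation loop by a
-- divide-and-conquer recursion on index halves (objective: alternative).

-- ===== PORT A =====
def intoStr (pageFrame : List Int) : String :=
  -- pf = []; for i in range(len(pageFrame)): pf.append(pageFrame[i]); pf.reverse()
  let pf := ((PySem.List.pyRange 0 (pageFrame.length : Int) 1).foldl
      (fun acc i => acc ++ [PySem.List.pyGetD pageFrame i 0]) []).reverse
  -- temp = ''; for i in range(len(pf)): temp = temp + str(pf[i])
  (PySem.List.pyRange 0 (pf.length : Int) 1).foldl
      (fun t i => t ++ PySem.Int.toStr (PySem.List.pyGetD pf i 0)) ""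

-- ===== PORT B =====
-- def go(lo, hi): reversed concatenation of pageFrame[lo:hi]; called only with lo < hi
def pvGoB (pf : List Int) (lo hi : Nat) : String :=
  if hi - lo = 1 then
    PySem.Int.toStr (PySem.List.pyGetD pf (lo : Int) 0)
  else if _h : lo + 1 < hi then
    -- mid = (lo + hi) // 2; return go(mid, hi) + go(lo, mid)
    pvGoB pf ((lo + hi) / 2) hi ++ pvGoB pf lo ((lo + hi) / 2)
  else ""  -- totality guard: Python never calls go with hi ≤ lo
termination_by hi - lo
decreasing_by all_goals omega

def intoStr_alt (pageFrame : List Int) : String :=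
  -- n = len(pageFrame); if n == 0: return ''; return go(0, n)
  if pageFrame.length = 0 then "" else pvGoB pageFrame 0 pageFrame.length

-- ===== PRECONDITION & SPEC =====
def Spec_intoStr (pageFrame : List Int) (out : String) : Prop := out = intoStr_alt pageFrame
instance (pageFrame : List Int) (out : String) : Decidable (Spec_intoStr pageFrame out) := by unfold Spec_intoStr; infer_instance

-- ===== CLAIM (what is proved, stated in full; the proofs are below) =====
def Claim_equal_intoStr : Prop := ∀ (pageFrame : List Int), Dom_intoStr pageFrame → Spec_intoStr pageFrame (intoStr pageFrame)

-- ===== LEMMAS AND PROOFS =====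

-- A's concatenation loop = join of the mapped list
theorem pv_foldl_append_eq_join (l : List Int) :
    l.foldl (fun t x => t ++ PySem.Int.toStr x) ""
      = String.join (l.map PySem.Int.toStr) := by
  rw [String.join, List.foldl_map]

-- the target value of both programs, as a function of a list segment
def pvRevJoin (l : List Int) : String := String.join (l.reverse.map PySem.Int.toStr)

theorem pv_foldl_str (l : List String) (a : String) :
    l.foldl (· ++ ·) a = a ++ l.foldl (· ++ ·) "" := by
  induction l generalizing a with
  | nil => simp
  | cons s l ih =>
      simp only [List.foldl_cons]
      rw [ih (a ++ s), ih ("" ++ s)]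
      simp [String.append_assoc]

theorem pv_join_append (a b : List String) :
    String.join (a ++ b) = String.join a ++ String.join b := by
  rw [String.join, String.join, String.join, List.foldl_append, pv_foldl_str b]

theorem pvRevJoin_append (s t : List Int) :
    pvRevJoin (s ++ t) = pvRevJoin t ++ pvRevJoin s := by
  simp [pvRevJoin, pv_join_append]

-- B's recursion computes pvRevJoin of the segment [lo, hi)
theorem pvGoB_eq (pf : List Int) :
    ∀ k lo hi, hi - lo = k → lo < hi → hi ≤ pf.length →
      pvGoB pf lo hi = pvRevJoin ((pf.drop lo).take (hi - lo)) := by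
  intro k
  induction k using Nat.strong_induction_on with
  | _ k ih =>
    intro lo hi hk hlt hle
    rw [pvGoB]
    by_cases h1 : hi - lo = 1
    · have hlo : lo < pf.length := by omega
      simp [h1, List.take_one, List.head?_drop, pf.getElem?_eq_getElem hlo,
        pvRevJoin, String.join]
    · have h2 : lo + 1 < hi := by omega
      simp only [h1, if_false, dif_pos h2]
      have hm1 : lo < (lo + hi) / 2 := by omega
      have hm2 : (lo + hi) / 2 < hi := by omega
      rw [ih (hi - (lo + hi) / 2) (by omega) ((lo + hi) / 2) hi rfl hm2 hle,
          ih ((lo + hi) / 2 - lo) (by omega) lo ((lo + hi) / 2) rfl hm1 (by omega)]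
      rw [← pvRevJoin_append]
      have : (pf.drop lo).take (hi - lo)
          = (pf.drop lo).take ((lo + hi) / 2 - lo)
            ++ (pf.drop ((lo + hi) / 2)).take (hi - (lo + hi) / 2) := by
        rw [show hi - lo = ((lo + hi) / 2 - lo) + (hi - (lo + hi) / 2) by omega,
            List.take_add, List.drop_drop,
            show lo + ((lo + hi) / 2 - lo) = (lo + hi) / 2 by omega]
      rw [this]

-- ===== VERDICT (by name: the statement is the Claim_ definition above) =====
theorem intoStr_spec : Claim_equal_intoStr := by
  intro pageFrame _
  unfold Spec_intoStr intoStr intoStr_alt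
  rw [PySem.List.foldl_pyRange_zero_pyGetD' pageFrame 0
        (fun acc v => acc ++ [v]) ([] : List Int)]
  simp only [PySem.List.foldl_append_singleton_eq_map, List.map_id_fun', id,
    List.nil_append]
  rw [PySem.List.foldl_pyRange_zero_pyGetD' pageFrame.reverse 0
        (fun t v => t ++ PySem.Int.toStr v) ""]
  rw [pv_foldl_append_eq_join]
  by_cases h : pageFrame.length = 0
  · simp [List.eq_nil_of_length_eq_zero h, String.join]
  · rw [if_neg h, pvGoB_eq pageFrame pageFrame.length 0 pageFrame.length rfl
        (by omega) le_rfl]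
    simp [pvRevJoin]
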